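-- pv_equiv track=rewrite | github.com/iZelikov/beegeek-algo | task_10_5.py | longest_sublist_of_ones
-- ===== SOURCE A (Python) =====
-- def longest_sublist_of_ones(binary_list):
--     left = right = max_list = 0
--     for i in binary_list:
--         if i:
--             right += 1
--         else:
--             max_list = max(max_list, left + right)
--             left, right = right, 0
--     max_list = max(max_list, left + right)
--     return min(max_list, len(binary_list) - 1)
-- ===== SOURCE B (Python) =====
-- def longest_sublist_of_ones(binary_list):
--     # Decompose the list into run lengths of truthy values (most recent run first),
--     # then the answer is the best sum of two adjacent runs, capped at len-1.
--     rev_runs = [0]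
--     for x in binary_list:
--         if x:
--             rev_runs[0] += 1
--         else:
--             rev_runs.insert(0, 0)
--     best = max(a + b for a, b in zip(rev_runs, rev_runs[1:] + [0]))
--     return min(best, len(binary_list) - 1)
-- ===== Notes on version B (the rewrite author's own statement) =====
-- stated objective: alternative
-- what changed: B replaces A's online three-register scan (left/right run lengths with a running max) by an explicit run-length decomposition of the list followed by a zip/max pass over adjacent run sums, keeping the final min(best, len-1) cap.
import Mathlib
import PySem

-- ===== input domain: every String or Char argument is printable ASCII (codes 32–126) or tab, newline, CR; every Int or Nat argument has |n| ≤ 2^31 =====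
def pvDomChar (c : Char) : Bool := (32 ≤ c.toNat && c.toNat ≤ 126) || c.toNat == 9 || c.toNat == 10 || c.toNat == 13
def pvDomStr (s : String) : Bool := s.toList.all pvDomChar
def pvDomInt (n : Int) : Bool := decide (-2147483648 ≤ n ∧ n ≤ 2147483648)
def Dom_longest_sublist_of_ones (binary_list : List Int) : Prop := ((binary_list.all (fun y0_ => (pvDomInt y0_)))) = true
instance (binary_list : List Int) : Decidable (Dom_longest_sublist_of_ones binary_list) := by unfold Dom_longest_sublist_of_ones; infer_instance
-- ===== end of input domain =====

-- B re-implements the scan as run-length decomposition + a zip/max pass (objective: alternative, same O(n) cost).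
-- ===== PORT A =====
-- state = (left, right, max_list)
def pvStepA (st : Int × Int × Int) (i : Int) : Int × Int × Int :=
  if i ≠ 0 then (st.1, st.2.1 + 1, st.2.2)
  else (st.2.1, 0, max st.2.2 (st.1 + st.2.1))

def longest_sublist_of_ones (binary_list : List Int) : Int :=
  let s := binary_list.foldl pvStepA (0, 0, 0)
  min (max s.2.2 (s.1 + s.2.1)) ((binary_list.length : Int) - 1)

-- ===== PORT B =====
-- rev_runs[0] += 1 / rev_runs.insert(0, 0) on the (always nonempty) run list
def pvStepB (rs : List Int) (x : Int) : List Int :=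
  if x ≠ 0 then (rs.headD 0 + 1) :: rs.tail else 0 :: rs

def longest_sublist_of_ones_alt (binary_list : List Int) : Int :=
  let rev_runs := binary_list.foldl pvStepB [0]
  -- max(a + b for a, b in zip(rev_runs, rev_runs[1:] + [0])); the zipped list is
  -- nonempty (rev_runs always is), so Python's max never raises and getD 0 is never taken
  let best := (PySem.List.max?
      ((rev_runs.zip (rev_runs.tail ++ [0])).map (fun p => p.1 + p.2)) (fun y => y)).getD 0
  min best ((binary_list.length : Int) - 1)

-- ===== PRECONDITION & SPEC =====
def Spec_longest_sublist_of_ones (binary_list : List Int) (out : Int) : Prop := out = longest_sublist_of_ones_alt binary_list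
instance (binary_list : List Int) (out : Int) : Decidable (Spec_longest_sublist_of_ones binary_list out) := by unfold Spec_longest_sublist_of_ones; infer_instance

-- ===== CLAIM (what is proved, stated in full; the proofs are below) =====
def Claim_equal_longest_sublist_of_ones : Prop := ∀ (binary_list : List Int), Dom_longest_sublist_of_ones binary_list → Spec_longest_sublist_of_ones binary_list (longest_sublist_of_ones binary_list)

-- ===== LEMMAS AND PROOFS =====

-- best adjacent-pair sum of a run list (last element paired with 0)
def pvPairMax : List Int → Int
  | [] => 0
  | [a] => a
  | a :: b :: t => max (a + b) (pvPairMax (b :: t))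

lemma pvPairMax_cons (r : Int) (t : List Int) (hr : 0 ≤ r) :
    pvPairMax (r :: t) = max (r + t.headD 0) (pvPairMax t) := by
  cases t with
  | nil => simp [pvPairMax]; omega
  | cons b t' => simp [pvPairMax]

-- the sums Python's zip generator produces
def pvSums : List Int → List Int
  | [] => []
  | [a] => [a]
  | a :: b :: t => (a + b) :: pvSums (b :: t)

lemma pvSums_eq : ∀ (a : Int) (t : List Int),
    (((a :: t).zip (t ++ [0])).map (fun p => p.1 + p.2)) = pvSums (a :: t) := by
  intro a t
  induction t generalizing a with
  | nil => simp [pvSums]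
  | cons b t' ih => simp [pvSums, ih b]

lemma pvSums_ne_nil (a : Int) (t : List Int) : pvSums (a :: t) ≠ [] := by
  cases t <;> simp [pvSums]

lemma pvFoldl_max_assoc (l : List Int) (a b : Int) :
    List.foldl max (max a b) l = max a (List.foldl max b l) := by
  induction l generalizing b with
  | nil => rfl
  | cons c l' ih =>
    simp only [List.foldl_cons]
    rw [max_assoc, ih]

lemma pvMax_sums : ∀ (t : List Int) (a : Int),
    (PySem.List.max? (pvSums (a :: t)) (fun y => y)).getD 0 = pvPairMax (a :: t) := by
  intro t
  induction t with
  | nil => intro a; simp [pvSums, pvPairMax, PySem.List.max?_id_cons]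
  | cons b t' ih =>
    intro a
    obtain ⟨c, rest, hc⟩ : ∃ c rest, pvSums (b :: t') = c :: rest := by
      cases h : pvSums (b :: t') with
      | nil => exact absurd h (pvSums_ne_nil b t')
      | cons c rest => exact ⟨c, rest, rfl⟩
    have hb := ih b
    rw [hc] at hb
    rw [PySem.List.max?_id_cons] at hb
    simp only [Option.getD_some] at hb
    show (PySem.List.max? ((a + b) :: pvSums (b :: t')) (fun y => y)).getD 0 = _
    rw [hc, PySem.List.max?_id_cons]
    simp only [Option.getD_some, List.foldl_cons]
    rw [pvFoldl_max_assoc, hb]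
    simp [pvPairMax]

-- loop invariant: A's registers are (second-last run, last run, best pair among older runs)
lemma pvLoop_key : ∀ (xs : List Int) (r : Int) (t : List Int), 0 ≤ r → (∀ y ∈ t, 0 ≤ y) →
    ∃ r' t', List.foldl pvStepB (r :: t) xs = r' :: t' ∧ 0 ≤ r' ∧ (∀ y ∈ t', 0 ≤ y) ∧
      List.foldl pvStepA (t.headD 0, r, pvPairMax t) xs = (t'.headD 0, r', pvPairMax t') := by
  intro xs
  induction xs with
  | nil => intro r t hr ht; exact ⟨r, t, rfl, hr, ht, rfl⟩
  | cons x xs ih =>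
    intro r t hr ht
    by_cases hx : x = 0
    · have hA : pvStepA (t.headD 0, r, pvPairMax t) x
          = ((r :: t).headD 0, 0, pvPairMax (r :: t)) := by
        simp [pvStepA, hx, pvPairMax_cons r t hr]
        omega
      have hB : pvStepB (r :: t) x = 0 :: r :: t := by simp [pvStepB, hx]
      simp only [List.foldl_cons, hA, hB]
      exact ih 0 (r :: t) le_rfl (by
        intro y hy
        rcases List.mem_cons.mp hy with h | h
        · omega
        · exact ht y h)
    · have hA : pvStepA (t.headD 0, r, pvPairMax t) x = (t.headD 0, r + 1, pvPairMax t) := by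
        simp [pvStepA, hx]
      have hB : pvStepB (r :: t) x = (r + 1) :: t := by simp [pvStepB, hx]
      simp only [List.foldl_cons, hA, hB]
      exact ih (r + 1) t (by omega) ht

-- ===== VERDICT (by name: the statement is the Claim_ definition above) =====
theorem longest_sublist_of_ones_spec : Claim_equal_longest_sublist_of_ones := by
  intro binary_list _
  unfold Spec_longest_sublist_of_ones longest_sublist_of_ones longest_sublist_of_ones_alt
  obtain ⟨r', t', hB, hr', _, hA⟩ :=
    pvLoop_key binary_list 0 [] le_rfl (by intro y hy; simp at hy)
  have h0 : (([] : List Int).headD 0, (0 : Int), pvPairMax []) = ((0 : Int), (0 : Int), (0 : Int)) := rfl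
  rw [h0] at hA
  simp only [hA, hB, List.tail_cons]
  rw [pvSums_eq, pvMax_sums, pvPairMax_cons r' t' hr']
  have : max (pvPairMax t') (t'.headD 0 + r') = max (r' + t'.headD 0) (pvPairMax t') := by
    omega
  rw [this]
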